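-- pv_equiv track=rewrite | github.com/pypi-data/pypi-mirror-304 | packages/php-version-compare/php_version_compare-1.1.2.tar.gz/php_version_compare-1.1.2/src/php_version_compare/versioning.py | _split_version
-- ===== SOURCE A (Python) =====
-- from typing import Iterable, Optional, Union, overload
--
-- def _split_version(version: str) -> Iterable[str]:
--     """
--      Split a version string into its components. This function is used to split a
--      version string into its major, minor, patch, and suffix components.
--
--     Examples:
--          >>> list(_split_version("1.0"))
--          ['1', '0']
--          >>> list(_split_version("1.0-DEV"))
--          ['1', '0', 'DEV']
--          >>> list(_split_version("1.0.1alpha"))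
--          ['1', '0', '1', 'alpha']
--
--      Args:
--          version: The version string to split.
--
--      Yields:
--          The components of the version string.
--     """
--     current_segment = ""
--
--     for curr_char in version:
--         if curr_char in "-+_.":
--             yield current_segment
--             current_segment = ""
--         elif current_segment and (
--             (current_segment[-1].isdigit() and curr_char.isalpha())
--             or (current_segment[-1].isalpha() and curr_char.isdigit())
--         ):
--             yield current_segment
--             current_segment = curr_char
--         else:
--             current_segment += curr_char
--
--     yield current_segment
-- ===== SOURCE B (Python) =====
-- def _kind(ch):
--     if ch.isdigit():
--         return 1
--     if ch.isalpha():
--         return 2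
--     return 0
--
--
-- def _split_piece(piece):
--     parts = []
--     cur = ""
--     for ch in piece:
--         if cur and _kind(cur[-1]) != 0 and _kind(ch) != 0 and _kind(cur[-1]) != _kind(ch):
--             parts.append(cur)
--             cur = ch
--         else:
--             cur += ch
--     parts.append(cur)
--     return parts
--
--
-- def _split_version(version):
--     canon = version.replace("-", ".").replace("+", ".").replace("_", ".")
--     for piece in canon.split("."):
--         yield from _split_piece(piece)
-- ===== Notes on version B (the rewrite author's own statement) =====
-- stated objective: alternative
-- what changed: Replaces A's single interleaved generator pass (separator handling and digit/alpha boundary detection mixed in one loop) by two differently-shaped passes: first canonicalise all four separator characters to one of them via str.replace and split on it with str.split, then split each resulting piece only at digit-to-alpha or alpha-to-digit boundaries using a character-kind classifier, concatenating the sub-tokens.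
import Mathlib
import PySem

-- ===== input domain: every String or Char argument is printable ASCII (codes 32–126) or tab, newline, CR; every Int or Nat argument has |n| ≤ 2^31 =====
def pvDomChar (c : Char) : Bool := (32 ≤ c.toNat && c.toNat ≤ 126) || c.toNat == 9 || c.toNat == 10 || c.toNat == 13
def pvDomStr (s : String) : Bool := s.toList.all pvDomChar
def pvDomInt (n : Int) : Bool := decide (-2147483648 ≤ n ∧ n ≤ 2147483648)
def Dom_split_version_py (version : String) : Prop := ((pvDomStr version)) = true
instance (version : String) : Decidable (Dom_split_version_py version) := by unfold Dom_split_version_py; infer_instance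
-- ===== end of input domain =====

-- B re-decomposes A's single interleaved pass into separator canonicalisation + split, then a
-- per-piece digit/alpha boundary pass; equivalent on all inputs, no speed claim.

-- ===== PORT A =====
-- curr_char in "-+_."
def pySepA (c : Char) : Bool := c == '-' || c == '+' || c == '_' || c == '.'

-- current_segment and ((current_segment[-1].isdigit() and curr_char.isalpha()) or (…))
def aBoundary (cur : List Char) (c : Char) : Bool :=
  !cur.isEmpty &&
    ((PySem.Chars.isdigit cur.getLast! && PySem.Chars.isalpha c) ||
     (PySem.Chars.isalpha cur.getLast! && PySem.Chars.isdigit c))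

def split_version_py (version : String) : List String :=
  let fin := version.toList.foldl
    (fun (st : List String × List Char) c =>
      if pySepA c then (st.1 ++ [String.mk st.2], [])
      else if aBoundary st.2 c then (st.1 ++ [String.mk st.2], [c])
      else (st.1, st.2 ++ [c]))
    ([], [])
  fin.1 ++ [String.mk fin.2]

-- ===== PORT B =====
def bKind (c : Char) : Nat :=
  if PySem.Chars.isdigit c then 1 else if PySem.Chars.isalpha c then 2 else 0

def bSplitPiece (piece : List Char) : List String :=
  let fin := piece.foldl
    (fun (st : List String × List Char) ch =>
      if !st.2.isEmpty && !(bKind st.2.getLast! == 0) && !(bKind ch == 0)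
          && !(bKind st.2.getLast! == bKind ch)
      then (st.1 ++ [String.mk st.2], [ch])
      else (st.1, st.2 ++ [ch]))
    ([], [])
  fin.1 ++ [String.mk fin.2]

def split_version_py_alt (version : String) : List String :=
  (PySem.Chars.splitOn
    (PySem.Chars.replace
      (PySem.Chars.replace (PySem.Chars.replace version.toList ['-'] ['.']) ['+'] ['.'])
      ['_'] ['.'])
    ['.']).flatMap bSplitPiece

-- ===== PRECONDITION & SPEC =====
def Spec_split_version_py (version : String) (out : List String) : Prop := out = split_version_py_alt version
instance (version : String) (out : List String) : Decidable (Spec_split_version_py version out) := by unfold Spec_split_version_py; infer_instance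

-- ===== CLAIM (what is proved, stated in full; the proofs are below) =====
def Claim_equal_split_version_py : Prop := ∀ (version : String), Dom_split_version_py version → Spec_split_version_py version (split_version_py version)

-- ===== LEMMAS AND PROOFS =====

-- the common recursion both ports reduce to
def gRun : List Char → List Char → List String
  | cur, [] => [String.mk cur]
  | cur, c :: cs =>
    if pySepA c then String.mk cur :: gRun [] cs
    else if aBoundary cur c then String.mk cur :: gRun [c] cs
    else gRun (cur ++ [c]) cs

-- per-piece recursion (no separators inside a piece)
def gpRun : List Char → List Char → List String
  | cur, [] => [String.mk cur]
  | cur, c :: cs =>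
    if aBoundary cur c then String.mk cur :: gpRun [c] cs
    else gpRun (cur ++ [c]) cs

def substSep (c : Char) : Char := if pySepA c then '.' else c

-- separator split as a pure recursion: (first piece, remaining pieces)
def spPieces : List Char → List Char × List (List Char)
  | [] => ([], [])
  | c :: cs =>
    let r := spPieces cs
    if c = '.' then ([], r.1 :: r.2) else (c :: r.1, r.2)

theorem digit_not_alpha (c : Char) (h : PySem.Chars.isdigit c = true) :
    PySem.Chars.isalpha c = false := by
  simp only [PySem.Chars.isdigit, Bool.and_eq_true, decide_eq_true_eq, Char.le_def,
    UInt32.le_iff_toNat_le] at h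
  simp only [PySem.Chars.isalpha, PySem.Chars.isupper, PySem.Chars.islower, Bool.or_eq_false_iff,
    Bool.and_eq_false_iff, decide_eq_false_iff_not, Char.le_def, UInt32.le_iff_toNat_le, not_le]
  have h0 : ('0' : Char).val.toNat = 48 := rfl
  have h9 : ('9' : Char).val.toNat = 57 := rfl
  have hA : ('A' : Char).val.toNat = 65 := rfl
  have ha : ('a' : Char).val.toNat = 97 := rfl
  constructor <;> [left; left] <;> omega

theorem bCond_eq_aBoundary (cur : List Char) (c : Char) :
    (!cur.isEmpty && !(bKind cur.getLast! == 0) && !(bKind c == 0)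
      && !(bKind cur.getLast! == bKind c)) = aBoundary cur c := by
  unfold aBoundary bKind
  by_cases hdl : PySem.Chars.isdigit cur.getLast! = true <;>
  by_cases hdc : PySem.Chars.isdigit c = true <;>
  by_cases hal : PySem.Chars.isalpha cur.getLast! = true <;>
  by_cases hac : PySem.Chars.isalpha c = true <;>
  simp_all [digit_not_alpha]

theorem foldA (cs : List Char) : ∀ (out : List String) (cur : List Char),
    (let fin := cs.foldl
      (fun (st : List String × List Char) c =>
        if pySepA c then (st.1 ++ [String.mk st.2], [])
        else if aBoundary st.2 c then (st.1 ++ [String.mk st.2], [c])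
        else (st.1, st.2 ++ [c]))
      (out, cur)
     fin.1 ++ [String.mk fin.2]) = out ++ gRun cur cs := by
  induction cs with
  | nil => intro out cur; simp [gRun]
  | cons c cs ih =>
    intro out cur
    simp only [List.foldl_cons, gRun]
    by_cases h1 : pySepA c = true
    · simp [h1, ih]
    · by_cases h2 : aBoundary cur c = true <;> simp [h1, h2, ih]

theorem foldGP (cs : List Char) : ∀ (out : List String) (cur : List Char),
    (let fin := cs.foldl
      (fun (st : List String × List Char) ch =>
        if aBoundary st.2 ch then (st.1 ++ [String.mk st.2], [ch])
        else (st.1, st.2 ++ [ch]))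
      (out, cur)
     fin.1 ++ [String.mk fin.2]) = out ++ gpRun cur cs := by
  induction cs with
  | nil => intro out cur; simp [gpRun]
  | cons c cs ih =>
    intro out cur
    simp only [List.foldl_cons, gpRun]
    by_cases h2 : aBoundary cur c = true <;> simp [h2, ih]

theorem foldB (cs : List Char) : ∀ (out : List String) (cur : List Char),
    (let fin := cs.foldl
      (fun (st : List String × List Char) ch =>
        if !st.2.isEmpty && !(bKind st.2.getLast! == 0) && !(bKind ch == 0)
            && !(bKind st.2.getLast! == bKind ch)
        then (st.1 ++ [String.mk st.2], [ch])
        else (st.1, st.2 ++ [ch]))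
      (out, cur)
     fin.1 ++ [String.mk fin.2]) = out ++ gpRun cur cs := by
  intro out cur
  have hstep : (fun (st : List String × List Char) ch =>
      if !st.2.isEmpty && !(bKind st.2.getLast! == 0) && !(bKind ch == 0)
          && !(bKind st.2.getLast! == bKind ch)
      then (st.1 ++ [String.mk st.2], [ch])
      else (st.1, st.2 ++ [ch]))
    = (fun (st : List String × List Char) ch =>
      if aBoundary st.2 ch then (st.1 ++ [String.mk st.2], [ch])
      else (st.1, st.2 ++ [ch])) := by
    funext st ch; rw [bCond_eq_aBoundary]
  rw [hstep]
  exact foldGP cs out cur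

theorem bSplitPiece_eq (p : List Char) : bSplitPiece p = gpRun [] p := by
  have := foldB p [] []
  simpa [bSplitPiece] using this

-- replace with single-char old/new is a map
theorem replace_go_single (a b : Char) (fuel : Nat) :
    ∀ (l : List Char) (acc : List Char), l.length ≤ fuel →
    PySem.Chars.replace.go [a] [b] fuel l acc
      = acc.reverse ++ l.map (fun c => if c = a then b else c) := by
  induction fuel with
  | zero =>
    intro l acc h
    have : l = [] := List.eq_nil_of_length_eq_zero (Nat.le_zero.mp h)
    subst this; simp [PySem.Chars.replace.go]
  | succ n ih =>
    intro l acc h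
    cases l with
    | nil => simp [PySem.Chars.replace.go]
    | cons c t =>
      simp only [PySem.Chars.replace.go]
      by_cases hc : c = a
      · subst hc
        simp [ih t _ (by simpa using Nat.le_of_succ_le_succ h)]
      · have : [a].isPrefixOf (c :: t) = false := by
          simp [List.isPrefixOf]; exact fun hh => absurd hh.symm hc
        simp [this, hc, ih t _ (by simpa using Nat.le_of_succ_le_succ h)]

theorem replace_single (a b : Char) (l : List Char) :
    PySem.Chars.replace l [a] [b] = l.map (fun c => if c = a then b else c) := by
  simp [PySem.Chars.replace, replace_go_single a b l.length l [] (le_refl _)]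

theorem canon_eq (l : List Char) :
    PySem.Chars.replace (PySem.Chars.replace (PySem.Chars.replace l ['-'] ['.']) ['+'] ['.']) ['_'] ['.']
      = l.map substSep := by
  simp only [replace_single, List.map_map]
  apply List.map_congr_left
  intro c _
  by_cases h1 : c = '-' <;> by_cases h2 : c = '+' <;> by_cases h3 : c = '_' <;>
    simp [h1, h2, h3, substSep, pySepA]

theorem splitOn_go_dot (fuel : Nat) :
    ∀ (l cur : List Char) (acc : List (List Char)), l.length ≤ fuel →
    PySem.Chars.splitOn.go ['.'] fuel l cur acc
      = acc.reverse ++ (cur.reverse ++ (spPieces l).1) :: (spPieces l).2 := by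
  induction fuel with
  | zero =>
    intro l cur acc h
    have : l = [] := List.eq_nil_of_length_eq_zero (Nat.le_zero.mp h)
    subst this; simp [PySem.Chars.splitOn.go, spPieces]
  | succ n ih =>
    intro l cur acc h
    cases l with
    | nil => simp [PySem.Chars.splitOn.go, spPieces]
    | cons c t =>
      simp only [PySem.Chars.splitOn.go]
      by_cases hc : c = '.'
      · subst hc
        have hp : List.isPrefixOf ['.'] ('.' :: t) = true := by simp [List.isPrefixOf]
        simp [hp, ih t [] _ (by simpa using Nat.le_of_succ_le_succ h), spPieces]
      · have hp : List.isPrefixOf ['.'] (c :: t) = false := by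
          simp [List.isPrefixOf]; exact fun hh => absurd hh.symm hc
        simp [hp, ih t (c :: cur) acc (by simpa using Nat.le_of_succ_le_succ h), spPieces, hc]

theorem splitOn_dot (l : List Char) :
    PySem.Chars.splitOn l ['.'] = (spPieces l).1 :: (spPieces l).2 := by
  simp [PySem.Chars.splitOn, splitOn_go_dot (l.length + 1) l [] [] (by omega)]

theorem main_bridge (cs : List Char) : ∀ (cur : List Char),
    gRun cur cs
      = gpRun cur (spPieces (cs.map substSep)).1
        ++ (spPieces (cs.map substSep)).2.flatMap (fun p => gpRun [] p) := by
  induction cs with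
  | nil => intro cur; simp [gRun, gpRun, spPieces]
  | cons c cs ih =>
    intro cur
    by_cases h1 : pySepA c = true
    · have hsub : substSep c = '.' := by simp [substSep, h1]
      simp only [gRun, h1, List.map_cons, hsub, spPieces]
      simp [gpRun, ih []]
    · have hsub : substSep c = c := by simp [substSep, h1]
      have hdot : ¬ c = '.' := by
        intro hh; subst hh; simp [pySepA] at h1
      simp only [gRun, h1, List.map_cons, hsub, spPieces, hdot]
      by_cases h2 : aBoundary cur c = true
      · simp [gpRun, h2, ih [c]]
      · simp [gpRun, h2, ih (cur ++ [c])]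

-- ===== VERDICT (by name: the statement is the Claim_ definition above) =====
theorem split_version_py_spec : Claim_equal_split_version_py := by
  intro version _
  unfold Spec_split_version_py split_version_py split_version_py_alt
  rw [foldA version.toList [] [], canon_eq, splitOn_dot]
  simp only [List.flatMap_cons, bSplitPiece_eq, List.nil_append]
  rw [main_bridge version.toList []]
  simp only [List.flatMap]
  exact congrArg _ (congrArg List.flatten (List.map_congr_left fun p _ => (bSplitPiece_eq p).symm))
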